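-- pv_equiv track=rewrite | github.com/iamjalipo/SH-WordAutoCorrect | WordAutoCorrect.py | insert_letter
-- ===== SOURCE A (Python) =====
-- def insert_letter(word):
--     alpha = 'abcdefghijklmnopqrstuvwxyz'
--     s3 = []
--     for i in range(len(word)+1):
--         for j in range(len(alpha)):
--             h = word
--             if i == 0 :
--                 h = alpha[j] + h
--                 s3.append(h)
--             else:
--                 h = h[:i] + alpha[j] + h[i:]
--                 s3.append(h)
--     return (set(s3))
-- ===== SOURCE B (Python) =====
-- def insert_letter(word):
--     alpha = 'abcdefghijklmnopqrstuvwxyz'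
--     out = []
--     pre, suf = '', word
--     while True:
--         # insert every letter at the current (pre, suf) split
--         for c in alpha:
--             out.append(pre + c + suf)
--         if not suf:
--             break
--         # move the split one character to the right
--         pre, suf = pre + suf[0], suf[1:]
--     return set(out)
-- ===== Notes on version B (the rewrite author's own statement) =====
-- stated objective: alternative
-- what changed: B replaces A's nested index loops that re-slice the word at every position for every letter with a single state-machine loop threading a (prefix, suffix) split accumulator: insert each letter at the current split, then move the split one character right; no index arithmetic or per-letter slicing remains.
import Mathlib
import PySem

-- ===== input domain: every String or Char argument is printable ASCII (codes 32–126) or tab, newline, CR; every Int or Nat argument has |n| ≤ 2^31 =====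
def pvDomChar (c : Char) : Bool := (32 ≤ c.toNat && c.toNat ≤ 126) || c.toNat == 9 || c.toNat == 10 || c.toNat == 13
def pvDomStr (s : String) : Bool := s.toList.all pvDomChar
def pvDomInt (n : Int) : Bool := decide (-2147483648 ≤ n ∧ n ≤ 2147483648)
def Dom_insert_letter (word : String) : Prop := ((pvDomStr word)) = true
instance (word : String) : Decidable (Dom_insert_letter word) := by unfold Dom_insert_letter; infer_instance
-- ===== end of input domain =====

-- B replaces A's nested index loops over split positions (re-slicing the word for every
-- letter) with a single state-machine loop threading a (prefix, suffix) split accumulator: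
-- insert each letter at the current split, then move the split right (objective: alternative).

-- ===== PORT A =====
-- alpha[j] is always in range (j < 26), so the .getD default is unreachable.
def insert_letter (word : String) : List String :=
  let alpha := "abcdefghijklmnopqrstuvwxyz"
  let s3 : List String :=
    (PySem.List.pyRange 0 (PySem.Str.len word + 1) 1).foldl (fun s3 i =>
      (PySem.List.pyRange 0 (PySem.Str.len alpha) 1).foldl (fun s3 j =>
        let h := word
        if i = 0 then
          let h := String.singleton ((PySem.Str.pyGet? alpha j).getD 'a') ++ h
          s3 ++ [h]
        else
          let h := PySem.Str.slice h none (some i) ++ String.singleton ((PySem.Str.pyGet? alpha j).getD 'a') ++ PySem.Str.slice h (some i) none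
          s3 ++ [h]) s3) []
  PySem.Set.ofList s3

-- ===== PORT B =====
-- B's while loop as structural recursion over the suffix, threading (out, pre)
def pvLoop (out : List String) (pre : String) (suf : List Char) : List String :=
  let out := out ++ "abcdefghijklmnopqrstuvwxyz".toList.map (fun c => pre ++ String.singleton c ++ String.ofList suf)
  match suf with
  | [] => out
  | h :: t => pvLoop out (pre ++ String.singleton h) t

def insert_letter_alt (word : String) : List String :=
  PySem.Set.ofList (pvLoop [] "" word.toList)

-- ===== PRECONDITION & SPEC =====
def Spec_insert_letter (word : String) (out : List String) : Prop := out = insert_letter_alt word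
instance (word : String) (out : List String) : Decidable (Spec_insert_letter word out) := by unfold Spec_insert_letter; infer_instance

-- ===== CLAIM (what is proved, stated in full; the proofs are below) =====
def Claim_equal_insert_letter : Prop := ∀ (word : String), Dom_insert_letter word → Spec_insert_letter word (insert_letter word)

-- ===== LEMMAS AND PROOFS =====

-- the 26 indexed lookups alpha[j] enumerate exactly alpha's characters
theorem pv_alpha_map :
    (PySem.List.pyRange 0 (PySem.Str.len "abcdefghijklmnopqrstuvwxyz") 1).map
      (fun j => (PySem.Str.pyGet? "abcdefghijklmnopqrstuvwxyz" j).getD 'a')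
    = "abcdefghijklmnopqrstuvwxyz".toList := by decide

theorem pv_slice_zero_to (s : String) : PySem.Str.slice s none (some 0) = "" := by
  simp [PySem.Str.slice, PySem.List.slice_to]

theorem pv_slice_zero_from (s : String) : PySem.Str.slice s (some 0) none = s := by
  simp [PySem.Str.slice, PySem.List.slice_from]

-- A's inner letter loop appends, per split i, one inserted string per alphabet character
theorem pv_inner (word : String) (i : Int) (s3 : List String) :
    (PySem.List.pyRange 0 (PySem.Str.len "abcdefghijklmnopqrstuvwxyz") 1).foldl (fun s3 j =>
        if i = 0 then
          s3 ++ [String.singleton ((PySem.Str.pyGet? "abcdefghijklmnopqrstuvwxyz" j).getD 'a') ++ word]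
        else
          s3 ++ [PySem.Str.slice word none (some i) ++ String.singleton ((PySem.Str.pyGet? "abcdefghijklmnopqrstuvwxyz" j).getD 'a') ++ PySem.Str.slice word (some i) none]) s3
    = s3 ++ "abcdefghijklmnopqrstuvwxyz".toList.map (fun c =>
        PySem.Str.slice word none (some i) ++ String.singleton c ++ PySem.Str.slice word (some i) none) := by
  by_cases hi : i = 0
  · subst hi
    simp only [if_true, pv_slice_zero_to, pv_slice_zero_from]
    rw [PySem.List.foldl_append_singleton_eq_map
        (fun j => String.singleton ((PySem.Str.pyGet? "abcdefghijklmnopqrstuvwxyz" j).getD 'a') ++ word)]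
    rw [show (fun j => String.singleton ((PySem.Str.pyGet? "abcdefghijklmnopqrstuvwxyz" j).getD 'a') ++ word)
        = (fun c => String.singleton c ++ word) ∘ (fun j => (PySem.Str.pyGet? "abcdefghijklmnopqrstuvwxyz" j).getD 'a') from rfl,
       ← List.map_map, pv_alpha_map]
    simp
    decide
  · simp only [if_neg hi]
    rw [PySem.List.foldl_append_singleton_eq_map
        (fun j => PySem.Str.slice word none (some i) ++ String.singleton ((PySem.Str.pyGet? "abcdefghijklmnopqrstuvwxyz" j).getD 'a') ++ PySem.Str.slice word (some i) none)]
    rw [show (fun j => PySem.Str.slice word none (some i) ++ String.singleton ((PySem.Str.pyGet? "abcdefghijklmnopqrstuvwxyz" j).getD 'a') ++ PySem.Str.slice word (some i) none)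
        = (fun c => PySem.Str.slice word none (some i) ++ String.singleton c ++ PySem.Str.slice word (some i) none) ∘ (fun j => (PySem.Str.pyGet? "abcdefghijklmnopqrstuvwxyz" j).getD 'a') from rfl,
       ← List.map_map, pv_alpha_map]

-- Python's range(len(word)+1) as a mapped List.range
theorem pv_range_cast (n : Nat) :
    PySem.List.pyRange 0 ((n : Int) + 1) 1 = (List.range (n + 1)).map (Nat.cast : Nat → Int) := by
  rw [PySem.List.pyRange_one]
  simp

-- the split-indexed insertion lists, summed over all splits, are exactly B's recursion
theorem pv_flat_go (s : String) :
    (List.range (s.toList.length + 1)).flatMap (fun (i : Nat) =>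
      "abcdefghijklmnopqrstuvwxyz".toList.map (fun c =>
        PySem.Str.slice s none (some (i : Int)) ++ String.singleton c ++
          PySem.Str.slice s (some (i : Int)) none))
    = pvLoop [] "" s.toList := by
  have key : ∀ (t : List Char) (pre s : String), s.toList = pre.toList ++ t →
      ∀ (out : List String),
      pvLoop out pre t
      = out ++ (List.range (t.length + 1)).flatMap (fun (i : Nat) =>
        "abcdefghijklmnopqrstuvwxyz".toList.map (fun c =>
          PySem.Str.slice s none (some ((pre.toList.length + i : Nat) : Int)) ++ String.singleton c ++
            PySem.Str.slice s (some ((pre.toList.length + i : Nat) : Int)) none)) := by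
    intro t
    induction t with
    | nil =>
      intro pre s hs out
      simp only [List.length_nil, Nat.zero_add, List.range_one, List.flatMap_cons,
        List.flatMap_nil, List.append_nil, pvLoop]
      congr 1
      apply List.map_congr_left
      intro c _
      apply String.toList_inj.mp
      simp only [String.toList_append, PySem.Str.slice, PySem.Chars.slice_eq_listSlice, hs,
        String.toList_singleton, String.toList_ofList]
      rw [PySem.List.slice_to_natCast, PySem.List.slice_from_natCast]
      simp [-String.length_toList]
    | cons h t ih =>
      intro pre s hs out
      simp only [pvLoop]
      rw [List.length_cons, List.range_succ_eq_map, List.flatMap_cons, List.flatMap_map]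
      rw [ih (pre ++ String.singleton h) s (by simp [hs]), List.append_assoc]
      refine congrArg (fun z => out ++ z) ?_
      refine congrArg₂ (· ++ ·) ?_ ?_
      · apply List.map_congr_left
        intro c _
        apply String.toList_inj.mp
        simp only [String.toList_append, PySem.Str.slice, PySem.Chars.slice_eq_listSlice, hs,
          String.toList_singleton, String.toList_ofList]
        rw [PySem.List.slice_to_natCast, PySem.List.slice_from_natCast]
        simp
      · apply List.flatMap_congr
        intro i _
        rw [show (pre ++ String.singleton h).toList.length + i = pre.toList.length + i.succ
            from by simp; omega]
  have h0 := key s.toList "" s (by simp) []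
  rw [h0, List.nil_append]
  apply List.flatMap_congr
  intro i _
  rw [show ("" : String).toList.length + i = i from by simp]

theorem pv_lists_eq (word : String) : insert_letter word = insert_letter_alt word := by
  simp only [insert_letter, insert_letter_alt]
  congr 1
  simp only [pv_inner]
  rw [PySem.List.foldl_append_eq_flatMap
      (fun i => "abcdefghijklmnopqrstuvwxyz".toList.map (fun c =>
        PySem.Str.slice word none (some i) ++ String.singleton c ++ PySem.Str.slice word (some i) none))]
  rw [PySem.Str.len_eq, pv_range_cast, List.flatMap_map]
  simp only [List.nil_append]
  exact pv_flat_go word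

-- ===== VERDICT (by name: the statement is the Claim_ definition above) =====
theorem insert_letter_spec : Claim_equal_insert_letter := by
  intro word _
  unfold Spec_insert_letter
  exact pv_lists_eq word
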